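-- pv_equiv track=rewrite | github.com/tanaka3/hitoris | controller/auto_player.py | _column_heights_from_grid
-- ===== SOURCE A (Python) =====
-- def _column_heights_from_grid(grid, width, height):
--     """gridから直接各列の高さを計算"""
--     heights = [0] * width
--     for x in range(width):
--         h = 0
--         for y in range(height):
--             if grid[y][x] != 0:
--                 h = height - y
--                 break
--         heights[x] = h
--     return heights
-- ===== SOURCE B (Python) =====
-- def _column_heights_from_grid(grid, width, height):
--     """gridから直接各列の高さを計算 (bottom-up row sweep, last write per column wins)"""
--     heights = [0] * width
--     if not heights:
--         return heights
--     for y in range(height - 1, -1, -1):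
--         for x in range(width):
--             if grid[y][x] != 0:
--                 heights[x] = height - y
--     return heights
-- ===== Notes on version B (the rewrite author's own statement) =====
-- stated objective: alternative
-- what changed: Replaces the per-column top-down scan with an early break by a single bottom-up row-major sweep with no break, overwriting each column's height so the last (topmost) write wins.
-- outside the precondition, e.g. on _column_heights_from_grid([[1]], 1, 2): A returns [2], B raises IndexError
import Mathlib
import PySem

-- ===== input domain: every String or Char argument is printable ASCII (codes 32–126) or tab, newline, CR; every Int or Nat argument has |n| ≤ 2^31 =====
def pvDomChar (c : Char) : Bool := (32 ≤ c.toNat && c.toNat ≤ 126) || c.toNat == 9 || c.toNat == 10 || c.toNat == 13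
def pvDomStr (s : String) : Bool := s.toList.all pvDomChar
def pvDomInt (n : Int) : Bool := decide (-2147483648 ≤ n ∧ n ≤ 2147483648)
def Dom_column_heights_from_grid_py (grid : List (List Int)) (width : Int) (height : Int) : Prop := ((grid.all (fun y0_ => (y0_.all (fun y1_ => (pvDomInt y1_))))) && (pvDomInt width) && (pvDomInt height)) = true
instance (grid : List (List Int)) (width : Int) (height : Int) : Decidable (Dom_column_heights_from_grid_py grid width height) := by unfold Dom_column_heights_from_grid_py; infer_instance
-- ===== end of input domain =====

-- B replaces A's per-column top-down scan with early break by a bottom-up row-major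
-- sweep without break (last, i.e. topmost, write per column wins); same cost, different traversal.

-- grid[y][x]; exact on Pre_ (indices in range there)
def pvCell (grid : List (List Int)) (y x : Int) : Int :=
  PySem.List.pyGetD (PySem.List.pyGetD grid y []) x 0

-- ===== PORT A =====
-- inner 'for y in range(height): if grid[y][x] != 0: h = height - y; break' (h starts 0)
def chInnerLoop (grid : List (List Int)) (x height : Int) : List Int → Int
  | [] => 0
  | y :: ys => if pvCell grid y x ≠ 0 then height - y else chInnerLoop grid x height ys

def column_heights_from_grid_py (grid : List (List Int)) (width : Int) (height : Int) : List Int :=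
  (PySem.List.pyRange 0 width 1).foldl
    (fun heights x =>
      heights.set x.toNat (chInnerLoop grid x height (PySem.List.pyRange 0 height 1)))
    (List.replicate width.toNat 0)

-- ===== PORT B =====
def column_heights_from_grid_py_alt (grid : List (List Int)) (width : Int) (height : Int) : List Int :=
  let heights : List Int := List.replicate width.toNat 0
  if heights.isEmpty then heights
  else
    (PySem.List.pyRange (height - 1) (-1) (-1)).foldl
      (fun heights y =>
        (PySem.List.pyRange 0 width 1).foldl
          (fun hs x => if PySem.List.pyGetD (PySem.List.pyGetD grid y []) x 0 ≠ 0 then hs.set x.toNat (height - y) else hs)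
          heights)
      heights

-- ===== PRECONDITION & SPEC =====
-- Pre_ excludes ragged/short grids, on which A raises IndexError — except the accidental case
-- where every column hits a nonzero cell (and breaks) before reaching a missing cell, where A
-- still returns but B (whole-grid sweep) naturally raises; both are excluded as non-rectangular.
def Pre_column_heights_from_grid_py (grid : List (List Int)) (width : Int) (height : Int) : Prop :=
  0 < width → (height.toNat ≤ grid.length ∧ ∀ row ∈ grid.take height.toNat, width.toNat ≤ row.length)
instance (grid : List (List Int)) (width : Int) (height : Int) : Decidable (Pre_column_heights_from_grid_py grid width height) := by unfold Pre_column_heights_from_grid_py; infer_instance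

def pvWitness_column_heights_from_grid_py : List (List Int) × Int × Int := ([[0, 1], [1, 1]], 2, 2)

def Spec_column_heights_from_grid_py (grid : List (List Int)) (width : Int) (height : Int) (out : List Int) : Prop := out = column_heights_from_grid_py_alt grid width height
instance (grid : List (List Int)) (width : Int) (height : Int) (out : List Int) : Decidable (Spec_column_heights_from_grid_py grid width height out) := by unfold Spec_column_heights_from_grid_py; infer_instance

-- ===== CLAIM (what is proved, stated in full; the proofs are below) =====
def Claim_equal_column_heights_from_grid_py : Prop := ∀ (grid : List (List Int)) (width : Int) (height : Int), Dom_column_heights_from_grid_py grid width height → Pre_column_heights_from_grid_py grid width height → Spec_column_heights_from_grid_py grid width height (column_heights_from_grid_py grid width height)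

-- ===== LEMMAS AND PROOFS =====

-- any length-preserving fold step preserves length
theorem pv_foldl_length {α β : Type} (g : List α → β → List α)
    (h : ∀ hs x, (g hs x).length = hs.length) :
    ∀ (l : List β) (init : List α), (l.foldl g init).length = init.length := by
  intro l
  induction l with
  | nil => intro init; rfl
  | cons x xs ih => intro init; simp [List.foldl, ih, h]

-- A-side fold of unconditional sets, pointwise
theorem pv_setfold_get (f : Int → Int) :
    ∀ (l : List Int) (init : List Int) (j : ℕ),
      (∀ x ∈ l, 0 ≤ x ∧ x.toNat < init.length) →
      (l.foldl (fun hs x => hs.set x.toNat (f x)) init)[j]? =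
        if (j : Int) ∈ l then some (f j) else init[j]? := by
  intro l
  induction l with
  | nil => intro init j _; simp
  | cons x xs ih =>
    intro init j hb
    have hx := hb x (List.mem_cons_self ..)
    have hrec := ih (init.set x.toNat (f x)) j
      (by intro z hz; simpa using hb z (List.mem_cons_of_mem _ hz))
    simp only [List.foldl_cons] at *
    rw [hrec]
    by_cases hmem : (j : Int) ∈ xs
    · simp [hmem]
    · by_cases hxe : x = (j : Int)
      · subst hxe
        simp [hmem, List.getElem?_set, Int.toNat_natCast]
        omega
      · have hne : x.toNat ≠ j := by
          intro h; apply hxe; omega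
        simp [hmem, hne]
        intro h; exact absurd h.symm hxe

-- B-side inner (row) fold of conditional sets, pointwise
theorem pv_rowfold_get (c : Int → Prop) [DecidablePred c] (v : Int) :
    ∀ (l : List Int) (init : List Int) (j : ℕ),
      (∀ x ∈ l, 0 ≤ x ∧ x.toNat < init.length) →
      (l.foldl (fun hs x => if c x then hs.set x.toNat v else hs) init)[j]? =
        if (j : Int) ∈ l ∧ c (j : Int) then some v else init[j]? := by
  intro l
  induction l with
  | nil => intro init j _; simp
  | cons x xs ih =>
    intro init j hb
    have hx := hb x (List.mem_cons_self ..)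
    have hlen : (if c x then init.set x.toNat v else init).length = init.length := by
      split <;> simp
    have hrec := ih (if c x then init.set x.toNat v else init) j
      (by intro z hz; rw [hlen]; exact hb z (List.mem_cons_of_mem _ hz))
    simp only [List.foldl_cons]
    rw [hrec]
    by_cases hcj : c (j : Int)
    · by_cases hmem : (j : Int) ∈ xs
      · simp [hmem, hcj, List.mem_cons]
      · by_cases hxj : x = (j : Int)
        · subst hxj
          simp [hmem, hcj, List.getElem?_set, Int.toNat_natCast]
          omega
        · have hne : x.toNat ≠ j := by intro h; apply hxj; omega
          by_cases hcx : c x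
          · simp [hmem, hcj, hcx, hne, List.mem_cons]
            intro h; exact absurd h.symm hxj
          · simp [hmem, hcj, hcx, List.mem_cons]
            intro h; exact absurd h.symm hxj
    · simp only [hcj, and_false, if_false]
      by_cases hcx : c x
      · have hne : x.toNat ≠ j := by
          intro h
          have : x = (j : Int) := by omega
          subst this; exact hcj hcx
        simp [hcx, hne]
      · simp [hcx]

-- B-side outer fold, pointwise: column j evolves by a scalar fold over the rows
theorem pv_outerfold_get (grid : List (List Int)) (width height : Int) :
    ∀ (ys : List Int) (init : List Int), init.length = width.toNat →
      ∀ j : ℕ, j < width.toNat →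
      (ys.foldl
        (fun heights y =>
          (PySem.List.pyRange 0 width 1).foldl
            (fun hs x => if PySem.List.pyGetD (PySem.List.pyGetD grid y []) x 0 ≠ 0 then hs.set x.toNat (height - y) else hs)
            heights)
        init)[j]? =
      some (ys.foldl (fun h y => if pvCell grid y (j : Int) ≠ 0 then height - y else h)
              (init.getD j 0)) := by
  intro ys
  induction ys with
  | nil =>
    intro init hlen j hj
    simp [List.getElem?_eq_getElem (by omega : j < init.length)]
  | cons y ys ih =>
    intro init hlen j hj
    have hbounds : ∀ x ∈ PySem.List.pyRange 0 width 1, 0 ≤ x ∧ x.toNat < init.length := by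
      intro x hx
      rw [PySem.List.mem_pyRange_one] at hx
      exact ⟨hx.1, by omega⟩
    have hmem : (j : Int) ∈ PySem.List.pyRange 0 width 1 := by
      rw [PySem.List.mem_pyRange_one]; omega
    have hrow := pv_rowfold_get
      (fun x => PySem.List.pyGetD (PySem.List.pyGetD grid y []) x 0 ≠ 0) (height - y)
      (PySem.List.pyRange 0 width 1) init j hbounds
    have hrlen : ((PySem.List.pyRange 0 width 1).foldl
        (fun hs x => if PySem.List.pyGetD (PySem.List.pyGetD grid y []) x 0 ≠ 0
                     then hs.set x.toNat (height - y) else hs) init).length = init.length :=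
      pv_foldl_length _ (by intro hs x; split <;> simp) _ _
    have hval : ((PySem.List.pyRange 0 width 1).foldl
        (fun hs x => if PySem.List.pyGetD (PySem.List.pyGetD grid y []) x 0 ≠ 0
                     then hs.set x.toNat (height - y) else hs) init).getD j 0 =
        if pvCell grid y (j : Int) ≠ 0 then height - y else init.getD j 0 := by
      rw [List.getD_eq_getElem?_getD, hrow]
      simp only [hmem, true_and, pvCell]
      split_ifs with h
      · rfl
      · exact (List.getD_eq_getElem?_getD ..).symm
    simp only [List.foldl_cons]
    exact (ih _ (by rw [hrlen, hlen]) j hj).trans (by rw [hval])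

-- A's inner loop is a foldr over the y range
theorem chInnerLoop_eq_foldr (grid : List (List Int)) (x height : Int) :
    ∀ l : List Int, chInnerLoop grid x height l =
      l.foldr (fun y h => if pvCell grid y x ≠ 0 then height - y else h) 0 := by
  intro l
  induction l with
  | nil => rfl
  | cons y ys ih => simp [chInnerLoop, ih]

-- ===== VERDICT (by name: the statement is the Claim_ definition above) =====
theorem column_heights_from_grid_py_spec : Claim_equal_column_heights_from_grid_py := by
  intro grid width height _ _
  unfold Spec_column_heights_from_grid_py column_heights_from_grid_py column_heights_from_grid_py_alt
  by_cases hw : (List.replicate width.toNat (0 : Int)).isEmpty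
  · have hw0 : width ≤ 0 := by
      simp at hw
      omega
    rw [PySem.List.pyRange_one_eq_nil hw0]
    simp [hw]
  · simp only [hw, if_neg, Bool.false_eq_true, not_false_eq_true]
    apply List.ext_getElem?
    intro j
    have hxb : ∀ x ∈ PySem.List.pyRange 0 width 1,
        0 ≤ x ∧ x.toNat < (List.replicate width.toNat (0 : Int)).length := by
      intro x hx
      rw [PySem.List.mem_pyRange_one] at hx
      refine ⟨hx.1, ?_⟩
      simp; omega
    rw [pv_setfold_get _ _ _ j hxb]
    by_cases hj : j < width.toNat
    · have hmem : (j : Int) ∈ PySem.List.pyRange 0 width 1 := by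
        rw [PySem.List.mem_pyRange_one]; omega
      rw [pv_outerfold_get grid width height _ _ (by simp) j hj]
      simp only [hmem, if_pos]
      congr 1
      rw [chInnerLoop_eq_foldr]
      have hrev : PySem.List.pyRange (height - 1) (-1) (-1) =
          (PySem.List.pyRange 0 height 1).reverse := by
        rw [PySem.List.pyRange_neg_one_eq_reverse]
        norm_num
      rw [hrev, List.foldl_reverse]
      simp
    · have hnm : (j : Int) ∉ PySem.List.pyRange 0 width 1 := by
        rw [PySem.List.mem_pyRange_one]; omega
      have hlen : ((PySem.List.pyRange (height - 1) (-1) (-1)).foldl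
          (fun heights y =>
            (PySem.List.pyRange 0 width 1).foldl
              (fun hs x => if PySem.List.pyGetD (PySem.List.pyGetD grid y []) x 0 ≠ 0 then hs.set x.toNat (height - y) else hs)
              heights)
          (List.replicate width.toNat 0)).length = width.toNat := by
        rw [pv_foldl_length]
        · simp
        · intro hs y
          apply pv_foldl_length
          intro hs' x; split <;> simp
      rw [if_neg hnm, List.getElem?_eq_none (by simp; omega), List.getElem?_eq_none (by rw [hlen]; omega)]
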